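-- pv_equiv track=rewrite | github.com/lane-marsh/hello-world | MaxSet.py | max_independent_set
-- ===== SOURCE A (Python) =====
-- def max_independent_set(nums):
--
--     if len(nums) == 0:
--         return []
--
--     result = []
--
--     arr_back_1 = []
--     score_back_1 = 0
--     arr_back_2 = []
--     score_back_2 = 0
--     arr_back_3 = []
--     score_back_3 = 0
--
--     for index, this_num in enumerate(nums):
--
--         if this_num < 0:
--             pass
--         elif index == 0:
--             arr_back_3.append(this_num)
--             score_back_3 = this_num
--             continue
--         elif index == 1:
--             arr_back_2.append(this_num)
--             score_back_2 = this_num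
--             continue
--         elif index == 2:
--             if len(arr_back_3) < 1:
--                 arr_back_1.append(this_num)
--                 score_back_1 = this_num
--             else:
--                 arr_back_1.append(arr_back_3[0])
--                 arr_back_1.append(this_num)
--                 score_back_1 = score_back_3 + this_num
--             continue
--
--         if this_num < 0:
--             this_score = max(score_back_2, score_back_3)
--             this_arr = arr_back_2.copy()
--             continue
--         elif score_back_2 > score_back_3:
--             this_score = score_back_2 + this_num
--             this_arr = arr_back_2.copy()
--             this_arr.append(this_num)
--         else:
--             this_score = score_back_3 + this_num
--             this_arr = arr_back_3.copy()
--             this_arr.append(this_num)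
--
--         score_back_3 = score_back_2
--         arr_back_3 = arr_back_2.copy()
--         score_back_2 = score_back_1
--         arr_back_2 = arr_back_1.copy()
--         score_back_1 = this_score
--         arr_back_1 = this_arr.copy()
--
--     if score_back_3 > score_back_2 and score_back_3 > score_back_1:
--         result = arr_back_3
--     elif score_back_2 > score_back_1:
--         result = arr_back_2
--     else:
--         result = arr_back_1
--
--     return result
-- ===== SOURCE B (Python) =====
-- def max_independent_set(nums):
--     # O(n): scalar scores + back-pointers into a node list; the chosen
--     # subsequence is reconstructed once at the end instead of copying
--     # candidate lists on every step.
--     nodes = []          # (value, parent index into nodes; -1 = chain start)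
--     b1 = (0, -1)        # (score, node index of last pick); mirrors back_1/2/3
--     b2 = (0, -1)
--     b3 = (0, -1)
--     for index, x in enumerate(nums):
--         if x < 0:
--             continue
--         if index == 0:
--             nodes.append((x, -1))
--             b3 = (x, len(nodes) - 1)
--         elif index == 1:
--             nodes.append((x, -1))
--             b2 = (x, len(nodes) - 1)
--         elif index == 2:
--             if b3[1] == -1:
--                 nodes.append((x, -1))
--                 b1 = (x, len(nodes) - 1)
--             else:
--                 nodes.append((x, b3[1]))
--                 b1 = (b3[0] + x, len(nodes) - 1)
--         else:
--             src = b2 if b2[0] > b3[0] else b3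
--             nodes.append((x, src[1]))
--             b3, b2, b1 = b2, b1, (src[0] + x, len(nodes) - 1)
--     if b3[0] > b2[0] and b3[0] > b1[0]:
--         win = b3
--     elif b2[0] > b1[0]:
--         win = b2
--     else:
--         win = b1
--     out = []
--     i = win[1]
--     while i != -1:
--         v, p = nodes[i]
--         out.append(v)
--         i = p
--     out.reverse()
--     return out
-- ===== Notes on version B (the rewrite author's own statement) =====
-- stated objective: faster
-- what changed: B replaces A's per-step copying of three candidate lists by scalar scores with back-pointers into a shared node list, reconstructing the winning subsequence once at the end.
import Mathlib
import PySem

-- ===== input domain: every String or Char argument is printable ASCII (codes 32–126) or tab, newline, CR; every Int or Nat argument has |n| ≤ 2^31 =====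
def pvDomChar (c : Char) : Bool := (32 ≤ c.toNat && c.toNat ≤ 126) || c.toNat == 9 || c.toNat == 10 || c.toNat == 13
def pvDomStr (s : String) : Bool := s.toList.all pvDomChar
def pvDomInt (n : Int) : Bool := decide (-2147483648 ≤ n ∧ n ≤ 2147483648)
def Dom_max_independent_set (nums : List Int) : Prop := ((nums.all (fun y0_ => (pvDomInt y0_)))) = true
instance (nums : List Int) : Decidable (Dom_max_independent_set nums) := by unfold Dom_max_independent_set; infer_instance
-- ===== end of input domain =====

-- B replaces A's per-step copying of three candidate lists by scalar scores with
-- back-pointers into a shared node list, reconstructing the winner once (faster).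

-- ===== PORT A =====
-- A's loop `for index, this_num in enumerate(nums)`, carrying the six variables.
-- A negative this_num falls through the first chain (`pass`) into the second
-- block's `if this_num < 0: … continue`, which changes no carried state.
def maxIndepLoopA (k : Nat) (xs : List Int)
    (a1 : List Int) (s1 : Int) (a2 : List Int) (s2 : Int) (a3 : List Int) (s3 : Int) :
    List Int × Int × List Int × Int × List Int × Int :=
  match xs with
  | [] => (a1, s1, a2, s2, a3, s3)
  | x :: rest =>
    if x < 0 then
      maxIndepLoopA (k + 1) rest a1 s1 a2 s2 a3 s3
    else if k = 0 then
      maxIndepLoopA (k + 1) rest a1 s1 a2 s2 (a3 ++ [x]) x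
    else if k = 1 then
      maxIndepLoopA (k + 1) rest a1 s1 (a2 ++ [x]) x a3 s3
    else if k = 2 then
      if a3.length < 1 then
        maxIndepLoopA (k + 1) rest (a1 ++ [x]) x a2 s2 a3 s3
      else
        -- arr_back_3[0]: a3 is nonempty in this branch, so it is a3.headI
        maxIndepLoopA (k + 1) rest ((a1 ++ [a3.headI]) ++ [x]) (s3 + x) a2 s2 a3 s3
    else
      if s2 > s3 then
        maxIndepLoopA (k + 1) rest (a2 ++ [x]) (s2 + x) a1 s1 a2 s2
      else
        maxIndepLoopA (k + 1) rest (a3 ++ [x]) (s3 + x) a1 s1 a2 s2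

def max_independent_set (nums : List Int) : List Int :=
  if nums.length = 0 then []
  else
    match maxIndepLoopA 0 nums [] 0 [] 0 [] 0 with
    | (a1, s1, a2, s2, a3, s3) =>
      if s3 > s2 ∧ s3 > s1 then a3 else if s2 > s1 then a2 else a1

-- ===== PORT B =====
-- the `while i != -1` reconstruction of Source B; fuel = len(nodes) always suffices
-- because every parent pointer is strictly smaller than its node's index
def collectB (nodes : List (Int × Int)) : Nat → Int → List Int
  | 0, _ => []
  | fuel + 1, i =>
    if i = -1 then []
    else
      match PySem.List.pyGet? nodes i with
      | none => []
      | some (v, p) => v :: collectB nodes fuel p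

def maxIndepLoopB (k : Nat) (xs : List Int)
    (nodes : List (Int × Int)) (b1 b2 b3 : Int × Int) :
    List (Int × Int) × (Int × Int) × (Int × Int) × (Int × Int) :=
  match xs with
  | [] => (nodes, b1, b2, b3)
  | x :: rest =>
    if x < 0 then
      maxIndepLoopB (k + 1) rest nodes b1 b2 b3
    else if k = 0 then
      maxIndepLoopB (k + 1) rest (nodes ++ [(x, -1)]) b1 b2 (x, (nodes.length : Int))
    else if k = 1 then
      maxIndepLoopB (k + 1) rest (nodes ++ [(x, -1)]) b1 (x, (nodes.length : Int)) b3
    else if k = 2 then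
      if b3.2 = -1 then
        maxIndepLoopB (k + 1) rest (nodes ++ [(x, -1)]) (x, (nodes.length : Int)) b2 b3
      else
        maxIndepLoopB (k + 1) rest (nodes ++ [(x, b3.2)]) (b3.1 + x, (nodes.length : Int)) b2 b3
    else
      let src := if b2.1 > b3.1 then b2 else b3
      maxIndepLoopB (k + 1) rest (nodes ++ [(x, src.2)]) (src.1 + x, (nodes.length : Int)) b1 b2

def max_independent_set_alt (nums : List Int) : List Int :=
  match maxIndepLoopB 0 nums [] (0, -1) (0, -1) (0, -1) with
  | (nodes, b1, b2, b3) =>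
    let win := if b3.1 > b2.1 ∧ b3.1 > b1.1 then b3 else if b2.1 > b1.1 then b2 else b1
    (collectB nodes nodes.length win.2).reverse

-- ===== PRECONDITION & SPEC =====
def Spec_max_independent_set (nums : List Int) (out : List Int) : Prop := out = max_independent_set_alt nums
instance (nums : List Int) (out : List Int) : Decidable (Spec_max_independent_set nums out) := by unfold Spec_max_independent_set; infer_instance

-- ===== CLAIM (what is proved, stated in full; the proofs are below) =====
def Claim_equal_max_independent_set : Prop := ∀ (nums : List Int), Dom_max_independent_set nums → Spec_max_independent_set nums (max_independent_set nums)

-- ===== LEMMAS AND PROOFS =====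

-- all parent pointers of the node list are ≥ -1 and strictly below their own index
def WFnodes (nodes : List (Int × Int)) : Prop :=
  ∀ j (h : j < nodes.length), -1 ≤ (nodes[j]).2 ∧ (nodes[j]).2 < (j : Int)

-- a B register (score, node index) represents A's (array, score) pair
def Reg (nodes : List (Int × Int)) (b : Int × Int) (arr : List Int) (score : Int) : Prop :=
  b.1 = score ∧ -1 ≤ b.2 ∧ b.2 < (nodes.length : Int) ∧
    (collectB nodes (b.2.toNat + 1) b.2).reverse = arr

-- invariant when the loops are about to process index k
def InvAB (k : Nat) (a1 : List Int) (s1 : Int) (a2 : List Int) (s2 : Int)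
    (a3 : List Int) (s3 : Int) (nodes : List (Int × Int)) (b1 b2 b3 : Int × Int) : Prop :=
  WFnodes nodes ∧ Reg nodes b1 a1 s1 ∧ Reg nodes b2 a2 s2 ∧ Reg nodes b3 a3 s3 ∧
    (k = 0 → a3 = []) ∧ (k ≤ 1 → a2 = []) ∧ (k ≤ 2 → a1 = [] ∧ a3.length ≤ 1)

def InvS (k : Nat) (sa : List Int × Int × List Int × Int × List Int × Int)
    (sb : List (Int × Int) × (Int × Int) × (Int × Int) × (Int × Int)) : Prop :=
  InvAB k sa.1 sa.2.1 sa.2.2.1 sa.2.2.2.1 sa.2.2.2.2.1 sa.2.2.2.2.2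
    sb.1 sb.2.1 sb.2.2.1 sb.2.2.2

lemma collectB_neg_one (nodes : List (Int × Int)) (fuel : Nat) :
    collectB nodes fuel (-1) = [] := by
  cases fuel <;> simp [collectB]

lemma collectB_append (nodes : List (Int × Int)) (e : Int × Int)
    (hwf : WFnodes nodes) :
    ∀ fuel i, -1 ≤ i → i < (nodes.length : Int) →
      collectB (nodes ++ [e]) fuel i = collectB nodes fuel i := by
  intro fuel
  induction fuel with
  | zero => intro i _ _; rfl
  | succ f ih =>
    intro i hge hlt
    by_cases hi : i = -1
    · simp [collectB, hi]
    · have h0 : 0 ≤ i := by omega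
      have hn : i.toNat < nodes.length := by omega
      have hget : PySem.List.pyGet? (nodes ++ [e]) i = some (nodes[i.toNat]) := by
        rw [PySem.List.pyGet?_of_nonneg _ h0]
        rw [List.getElem?_append_left (by omega)]
        simp [hn]
      have hget2 : PySem.List.pyGet? nodes i = some (nodes[i.toNat]) := by
        rw [PySem.List.pyGet?_of_nonneg _ h0]
        simp [hn]
      obtain ⟨hp1, hp2⟩ := hwf i.toNat hn
      simp only [collectB, if_neg hi, hget, hget2, List.get_eq_getElem]
      rw [ih (nodes[i.toNat]).2 hp1 (by omega)]

lemma collectB_fuel (nodes : List (Int × Int)) (hwf : WFnodes nodes) :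
    ∀ f₁ f₂ i, -1 ≤ i → i < (nodes.length : Int) →
      i.toNat < f₁ → i.toNat < f₂ →
      collectB nodes f₁ i = collectB nodes f₂ i := by
  intro f₁
  induction f₁ with
  | zero => intro f₂ i _ _ h _; omega
  | succ f ih =>
    intro f₂ i hge hlt hf1 hf2
    by_cases hi : i = -1
    · rw [hi, collectB_neg_one, collectB_neg_one]
    · obtain ⟨g, rfl⟩ : ∃ g, f₂ = g + 1 := ⟨f₂ - 1, by omega⟩
      have h0 : 0 ≤ i := by omega
      have hn : i.toNat < nodes.length := by omega
      have hget : PySem.List.pyGet? nodes i = some (nodes[i.toNat]) := by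
        rw [PySem.List.pyGet?_of_nonneg _ h0]; simp [hn]
      obtain ⟨hp1, hp2⟩ := hwf i.toNat hn
      simp only [collectB, if_neg hi, hget, List.get_eq_getElem]
      by_cases hp : (nodes[i.toNat]).2 = -1
      · rw [hp, collectB_neg_one, collectB_neg_one]
      · have : ((nodes[i.toNat]).2).toNat < i.toNat := by omega
        rw [ih g (nodes[i.toNat]).2 hp1 (by omega) (by omega) (by omega)]

-- appending a node with a valid parent keeps the node list well-formed
lemma WFnodes_append (nodes : List (Int × Int)) (x p : Int)
    (hwf : WFnodes nodes) (hp1 : -1 ≤ p) (hp2 : p < (nodes.length : Int)) :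
    WFnodes (nodes ++ [(x, p)]) := by
  intro j hj
  simp only [List.length_append, List.length_cons, List.length_nil] at hj
  by_cases h : j < nodes.length
  · rw [List.getElem_append_left h]; exact hwf j h
  · have : j = nodes.length := by omega
    subst this
    rw [List.getElem_append_right (le_refl _)]
    simpa using ⟨hp1, by omega⟩

-- an untouched register still represents its array after appending a node
lemma Reg_append (nodes : List (Int × Int)) (e : Int × Int) (b : Int × Int)
    (arr : List Int) (score : Int) (hwf : WFnodes nodes) (h : Reg nodes b arr score) :
    Reg (nodes ++ [e]) b arr score := by
  obtain ⟨h1, h2, h3, h4⟩ := h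
  refine ⟨h1, h2, by simp; omega, ?_⟩
  rw [collectB_append nodes e hwf _ _ h2 h3]; exact h4

-- the freshly appended node represents old-chain ++ [x]
lemma Reg_new (nodes : List (Int × Int)) (x : Int) (b : Int × Int) (arr : List Int) (score : Int)
    (hwf : WFnodes nodes) (hb : Reg nodes b arr score) :
    Reg (nodes ++ [(x, b.2)]) (score + x, (nodes.length : Int)) (arr ++ [x]) (score + x) := by
  obtain ⟨_, hp1, hp2, hchain⟩ := hb
  refine ⟨rfl, by omega, by simp, ?_⟩
  have hlen : ((nodes.length : Int)).toNat = nodes.length := by simp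
  simp only [hlen, collectB]
  have hne : (nodes.length : Int) ≠ -1 := by omega
  rw [if_neg hne, PySem.List.pyGet?_append_length]
  show (x :: collectB (nodes ++ [(x, b.2)]) nodes.length b.2).reverse = arr ++ [x]
  have hstab : collectB (nodes ++ [(x, b.2)]) nodes.length b.2 = collectB nodes nodes.length b.2 :=
    collectB_append nodes (x, b.2) hwf nodes.length b.2 hp1 hp2
  by_cases hp : b.2 = -1
  · have harr : arr = [] := by
      have h := hchain; rw [hp] at h
      simpa [collectB_neg_one] using h.symm
    simp [hp, collectB_neg_one, harr]
  · rw [hstab, collectB_fuel nodes hwf nodes.length (b.2.toNat + 1) b.2 hp1 hp2 (by omega) (by omega)]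
    simp [hchain]

-- if a register's chain is nonempty then its node index is not -1, and conversely
lemma Reg_empty_iff (nodes : List (Int × Int)) (b : Int × Int) (arr : List Int)
    (score : Int) (h : Reg nodes b arr score) : (b.2 = -1 ↔ arr = []) := by
  obtain ⟨_, h2, h3, h4⟩ := h
  constructor
  · intro hb; rw [hb, collectB_neg_one] at h4; simpa using h4.symm
  · intro ha
    by_contra hb
    have h0 : 0 ≤ b.2 := by omega
    have hn : b.2.toNat < nodes.length := by omega
    have hget : PySem.List.pyGet? nodes b.2 = some (nodes[b.2.toNat]) := by
      rw [PySem.List.pyGet?_of_nonneg _ h0]; simp [hn]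
    rw [ha] at h4
    simp only [collectB, if_neg hb, hget] at h4
    simp at h4

lemma loop_rel (xs : List Int) : ∀ (k : Nat) a1 s1 a2 s2 a3 s3 nodes b1 b2 b3,
    InvAB k a1 s1 a2 s2 a3 s3 nodes b1 b2 b3 →
    InvS (k + xs.length) (maxIndepLoopA k xs a1 s1 a2 s2 a3 s3)
      (maxIndepLoopB k xs nodes b1 b2 b3) := by
  induction xs with
  | nil => intro k a1 s1 a2 s2 a3 s3 nodes b1 b2 b3 h; simpa [maxIndepLoopA, maxIndepLoopB, InvS]
  | cons x rest ih =>
    intro k a1 s1 a2 s2 a3 s3 nodes b1 b2 b3 h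
    obtain ⟨hwf, hr1, hr2, hr3, hk0, hk1, hk2⟩ := h
    have hlen : k + (x :: rest).length = (k + 1) + rest.length := by simp; omega
    rw [hlen]
    by_cases hneg : x < 0
    · simp only [maxIndepLoopA, maxIndepLoopB, if_pos hneg]
      exact ih (k + 1) _ _ _ _ _ _ _ _ _ _
        ⟨hwf, hr1, hr2, hr3, by omega, fun h => hk1 (by omega), fun h => hk2 (by omega)⟩
    · by_cases hk0' : k = 0
      · subst hk0'
        simp only [maxIndepLoopA, maxIndepLoopB, if_neg hneg]
        have ha3 : a3 = [] := hk0 rfl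
        subst ha3
        have hwf' := WFnodes_append nodes x (-1) hwf (by omega) (by omega)
        have hnew : Reg (nodes ++ [(x, -1)]) (x, (nodes.length : Int)) ([] ++ [x]) x := by
          have := Reg_new nodes x ((0:Int), (-1:Int)) [] 0 hwf
            ⟨rfl, by omega, by omega, by rw [collectB_neg_one]; rfl⟩
          simpa using this
        refine ih 1 _ _ _ _ _ _ _ _ _ _
          ⟨hwf', Reg_append _ _ _ _ _ hwf hr1, Reg_append _ _ _ _ _ hwf hr2, by simpa using hnew,
           by omega, fun _ => hk1 (by omega), fun _ => ⟨(hk2 (by omega)).1, by simp⟩⟩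
      · by_cases hk1' : k = 1
        · subst hk1'
          simp only [maxIndepLoopA, maxIndepLoopB, if_neg hneg]
          have ha2 : a2 = [] := hk1 (by omega)
          subst ha2
          have hwf' := WFnodes_append nodes x (-1) hwf (by omega) (by omega)
          have hnew : Reg (nodes ++ [(x, -1)]) (x, (nodes.length : Int)) ([] ++ [x]) x := by
            have := Reg_new nodes x ((0:Int), (-1:Int)) [] 0 hwf
              ⟨rfl, by omega, by omega, by rw [collectB_neg_one]; rfl⟩
            simpa using this
          exact ih 2 _ _ _ _ _ _ _ _ _ _
            ⟨hwf', Reg_append _ _ _ _ _ hwf hr1, by simpa using hnew, Reg_append _ _ _ _ _ hwf hr3,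
             by omega, by omega, fun _ => ⟨(hk2 (by omega)).1, (hk2 (by omega)).2⟩⟩
        · by_cases hk2' : k = 2
          · subst hk2'
            obtain ⟨ha1, ha3len⟩ := hk2 (le_refl _)
            subst ha1
            have hempty := Reg_empty_iff nodes b3 a3 s3 hr3
            simp only [maxIndepLoopA, maxIndepLoopB, if_neg hneg]
            have h12 : ¬ ((2:Nat) = 0) := by omega
            have h12' : ¬ ((2:Nat) = 1) := by omega
            simp only [if_neg h12, if_neg h12']
            by_cases hb3 : b3.2 = -1
            · have ha3 : a3 = [] := hempty.mp hb3
              subst ha3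
              simp only [if_pos hb3, List.length_nil, if_pos (by omega : (0:Nat) < 1)]
              have hwf' := WFnodes_append nodes x (-1) hwf (by omega) (by omega)
              have hnew : Reg (nodes ++ [(x, -1)]) (x, (nodes.length : Int)) ([] ++ [x]) x := by
                have := Reg_new nodes x ((0:Int), (-1:Int)) [] 0 hwf
                  ⟨rfl, by omega, by omega, by rw [collectB_neg_one]; rfl⟩
                simpa using this
              exact ih 3 _ _ _ _ _ _ _ _ _ _
                ⟨hwf', by simpa using hnew, Reg_append _ _ _ _ _ hwf hr2,
                 Reg_append _ _ _ _ _ hwf hr3, by omega, by omega, by omega⟩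
            · have ha3ne : a3 ≠ [] := fun h => hb3 (hempty.mpr h)
              have ha3 : a3 = [a3.headI] := by
                cases a3 with
                | nil => exact absurd rfl ha3ne
                | cons y ys =>
                  simp at ha3len ⊢
                  cases ys with
                  | nil => rfl
                  | cons z zs => simp at ha3len
              have hlen3 : ¬ (a3.length < 1) := by
                cases a3 with
                | nil => exact absurd rfl ha3ne
                | cons y ys => simp
              simp only [if_neg hb3, if_neg hlen3]
              have hb31 := hr3.1; have hb32 := hr3.2.1; have hb33 := hr3.2.2.1
              have hwf' := WFnodes_append nodes x b3.2 hwf hb32 hb33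
              have hnew : Reg (nodes ++ [(x, b3.2)]) (s3 + x, (nodes.length : Int)) (a3 ++ [x]) (s3 + x) :=
                Reg_new nodes x b3 a3 s3 hwf hr3
              have harr : a3 ++ [x] = ([] ++ [a3.headI]) ++ [x] := by
                conv_lhs => rw [ha3]
                simp
              refine ih 3 _ _ _ _ _ _ _ _ _ _
                ⟨hwf', ?_, Reg_append _ _ _ _ _ hwf hr2, Reg_append _ _ _ _ _ hwf hr3,
                 by omega, by omega, by omega⟩
              rw [← harr]
              simpa [hb31] using hnew
          · -- k ≥ 3: the generic DP step
            simp only [maxIndepLoopA, maxIndepLoopB, if_neg hneg, if_neg hk0', if_neg hk1', if_neg hk2']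
            have hb21 := hr2.1
            have hb31 := hr3.1; have hb32b := hr3.2.1; have hb33b := hr3.2.2.1
            have hb11 := hr1.1
            by_cases hcmp : s2 > s3
            · have hcmp' : b2.1 > b3.1 := by rw [hb21, hb31]; exact hcmp
              simp only [if_pos hcmp, if_pos hcmp']
              have hwf' := WFnodes_append nodes x b2.2 hwf hr2.2.1 hr2.2.2.1
              have hnew := Reg_new nodes x b2 a2 s2 hwf hr2
              exact ih (k + 1) _ _ _ _ _ _ _ _ _ _
                ⟨hwf', by simpa [hb21] using hnew, Reg_append _ _ _ _ _ hwf hr1,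
                 Reg_append _ _ _ _ _ hwf hr2, by omega, by omega, by omega⟩
            · have hcmp' : ¬ (b2.1 > b3.1) := by rw [hb21, hb31]; exact hcmp
              simp only [if_neg hcmp, if_neg hcmp']
              have hwf' := WFnodes_append nodes x b3.2 hwf hb32b hb33b
              have hnew := Reg_new nodes x b3 a3 s3 hwf hr3
              exact ih (k + 1) _ _ _ _ _ _ _ _ _ _
                ⟨hwf', by simpa [hb31] using hnew, Reg_append _ _ _ _ _ hwf hr1,
                 Reg_append _ _ _ _ _ hwf hr2, by omega, by omega, by omega⟩

-- the final reconstruction with fuel = nodes.length yields the represented array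
lemma Reg_collect_full (nodes : List (Int × Int)) (b : Int × Int) (arr : List Int)
    (score : Int) (hwf : WFnodes nodes) (h : Reg nodes b arr score) :
    (collectB nodes nodes.length b.2).reverse = arr := by
  obtain ⟨_, h2, h3, h4⟩ := h
  by_cases hb : b.2 = -1
  · rw [hb, collectB_neg_one]
    rw [hb, collectB_neg_one] at h4
    simpa using h4
  · rw [collectB_fuel nodes hwf nodes.length (b.2.toNat + 1) b.2 h2 h3 (by omega) (by omega)]
    exact h4

-- ===== VERDICT (by name: the statement is the Claim_ definition above) =====
theorem max_independent_set_spec : Claim_equal_max_independent_set := by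
  unfold Claim_equal_max_independent_set
  intro nums _
  unfold Spec_max_independent_set
  have hinit : InvAB 0 [] 0 [] 0 [] 0 [] (0, -1) (0, -1) (0, -1) := by
    refine ⟨fun j h => by simp at h, ?_, ?_, ?_, fun _ => rfl, fun _ => rfl, fun _ => ⟨rfl, by simp⟩⟩
    all_goals exact ⟨rfl, by omega, by simp, by rw [collectB_neg_one]; rfl⟩
  have hmain := loop_rel nums 0 [] 0 [] 0 [] 0 [] (0, -1) (0, -1) (0, -1) hinit
  unfold max_independent_set max_independent_set_alt
  cases nums with
  | nil => decide
  | cons y ys =>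
    simp only [List.length_cons, if_neg (by omega : ¬ (ys.length + 1 = 0))]
    revert hmain
    cases hA : maxIndepLoopA 0 (y :: ys) [] 0 [] 0 [] 0 with
    | mk a1 r1 =>
      cases r1 with | mk s1 r2 => cases r2 with | mk a2 r3 => cases r3 with | mk s2 r4 =>
      cases r4 with | mk a3 s3 =>
      cases hB : maxIndepLoopB 0 (y :: ys) [] (0, -1) (0, -1) (0, -1) with
      | mk nodes rb =>
        cases rb with | mk b1 rb2 => cases rb2 with | mk b2 b3 =>
        intro hmain
        obtain ⟨hwf, hr1, hr2, hr3, _, _, _⟩ := hmain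
        have e1 := hr1.1; have e2 := hr2.1; have e3 := hr3.1
        simp only []
        by_cases hc1 : s3 > s2 ∧ s3 > s1
        · have hc1' : b3.1 > b2.1 ∧ b3.1 > b1.1 := by rw [e1, e2, e3]; exact hc1
          rw [if_pos hc1, if_pos hc1']
          exact (Reg_collect_full nodes b3 a3 s3 hwf hr3).symm
        · have hc1' : ¬ (b3.1 > b2.1 ∧ b3.1 > b1.1) := by rw [e1, e2, e3]; exact hc1
          rw [if_neg hc1, if_neg hc1']
          by_cases hc2 : s2 > s1
          · have hc2' : b2.1 > b1.1 := by rw [e1, e2]; exact hc2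
            rw [if_pos hc2, if_pos hc2']
            exact (Reg_collect_full nodes b2 a2 s2 hwf hr2).symm
          · have hc2' : ¬ (b2.1 > b1.1) := by rw [e1, e2]; exact hc2
            rw [if_neg hc2, if_neg hc2']
            exact (Reg_collect_full nodes b1 a1 s1 hwf hr1).symm
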